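-- pv_equiv track=rewrite | github.com/Jihoon0309/Programmers | Level_2/기능개발.py | solution
-- ===== SOURCE A (Python) =====
-- def solution(progresses, speeds):
--     completion_list=[]
--
--     for i in range(len(progresses)):
--         sum=progresses[i]
--         completion=0
--         while sum<100:
--             sum+=speeds[i]
--             completion+=1
--         completion_list.append(completion)
--
--     result=[]
--     days=1
--     max=completion_list[0]
--
--     for i in range(1,len(completion_list)):
--         if max<completion_list[i]:
--             max=completion_list[i]
--             result.append(days)
--             days=1
--         else:
--             days+=1
--     result.append(days)
--
--     return result
-- ===== SOURCE B (Python) =====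
-- def solution(progresses, speeds):
--     # closed-form ceiling division for each feature's release day,
--     # then group-boundary indices + differences instead of a running counter
--     days = []
--     for i in range(len(progresses)):
--         p = progresses[i]
--         days.append(0 if p >= 100 else -((p - 100) // speeds[i]))
--     m = days[0]
--     bounds = [0]
--     for i in range(1, len(days)):
--         if m < days[i]:
--             m = days[i]
--             bounds.append(i)
--     bounds.append(len(days))
--     return [bounds[j + 1] - bounds[j] for j in range(len(bounds) - 1)]
-- ===== Notes on version B (the rewrite author's own statement) =====
-- stated objective: alternative
-- what changed: Each feature's release day is computed by a closed-form ceiling division instead of A's incremental while loop, and groups are formed by collecting boundary indices where a new running maximum starts and taking adjacent differences, instead of A's running day counter.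
import Mathlib
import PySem

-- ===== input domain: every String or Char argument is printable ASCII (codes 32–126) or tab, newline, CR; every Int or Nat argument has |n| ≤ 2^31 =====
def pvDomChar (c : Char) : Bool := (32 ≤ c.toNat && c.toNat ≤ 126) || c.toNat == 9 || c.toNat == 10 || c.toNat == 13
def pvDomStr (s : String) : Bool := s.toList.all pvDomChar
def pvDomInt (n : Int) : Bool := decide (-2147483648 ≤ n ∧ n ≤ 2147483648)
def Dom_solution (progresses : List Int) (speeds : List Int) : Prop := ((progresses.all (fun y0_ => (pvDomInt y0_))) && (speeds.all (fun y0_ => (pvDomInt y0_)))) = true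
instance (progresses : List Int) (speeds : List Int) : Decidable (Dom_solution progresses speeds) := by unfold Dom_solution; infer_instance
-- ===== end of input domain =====

-- B: closed-form ceiling division replaces A's per-feature while loop, and group-boundary
-- indices + adjacent differences replace A's running group counter (alternative decomposition).


-- ===== PORT A =====
-- A's inner 'while sum < 100: sum += speeds[i]; completion += 1'; the '0 < speed' test is only
-- a totality guard (Python diverges on non-positive speed there; such inputs are outside Pre_).
def whileA (speed : Int) (sum : Int) (completion : Int) : Int :=
  if _h : sum < 100 then
    if _hs : 0 < speed then whileA speed (sum + speed) (completion + 1) else completion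
  else completion
termination_by (100 - sum).toNat
decreasing_by omega

-- one step of A's grouping loop over the state (result, days, max)
def stepA (st : List Int × Int × Int) (c : Int) : List Int × Int × Int :=
  if st.2.2 < c then (st.1 ++ [st.2.1], 1, c) else (st.1, st.2.1 + 1, st.2.2)

def solution (progresses : List Int) (speeds : List Int) : List Int :=
  let completionList :=
    (PySem.List.pyRange 0 progresses.length 1).foldl
      (fun acc i =>
        acc ++ [whileA (PySem.List.pyGetD speeds i 0) (PySem.List.pyGetD progresses i 0) 0]) []
  let st :=
    (PySem.List.pyRange 1 completionList.length 1).foldl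
      (fun st i => stepA st (PySem.List.pyGetD completionList i 0))
      ([], 1, PySem.List.pyGetD completionList 0 0)
  st.1 ++ [st.2.1]

-- ===== PORT B =====
-- one step of B's boundary-collecting loop over the state (m, bounds)
def stepB (days : List Int) (st : Int × List Int) (i : Int) : Int × List Int :=
  let d := PySem.List.pyGetD days i 0
  if st.1 < d then (d, st.2 ++ [i]) else st

def solution_alt (progresses : List Int) (speeds : List Int) : List Int :=
  let days :=
    (PySem.List.pyRange 0 progresses.length 1).foldl
      (fun acc i =>
        let p := PySem.List.pyGetD progresses i 0
        acc ++ [if 100 ≤ p then 0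
                else -(PySem.Int.floordiv (p - 100) (PySem.List.pyGetD speeds i 0))]) []
  let st := (PySem.List.pyRange 1 days.length 1).foldl (stepB days) (PySem.List.pyGetD days 0 0, [0])
  let bounds := st.2 ++ [(days.length : Int)]
  (PySem.List.pyRange 0 ((bounds.length : Int) - 1) 1).foldl
    (fun acc j => acc ++ [PySem.List.pyGetD bounds (j + 1) 0 - PySem.List.pyGetD bounds j 0]) []

-- ===== PRECONDITION & SPEC =====
-- Pre_ excludes exactly the inputs on which Python A does not return normally: the empty
-- progresses list (IndexError on completion_list[0]) and any index with progress < 100 whose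
-- speed entry is missing (IndexError) or not positive (A's while loop never terminates).
def Pre_solution (progresses : List Int) (speeds : List Int) : Prop :=
  progresses ≠ [] ∧
    ∀ i < progresses.length,
      100 ≤ progresses.getD i 0 ∨ (i < speeds.length ∧ 0 < speeds.getD i 0)
instance (progresses : List Int) (speeds : List Int) : Decidable (Pre_solution progresses speeds) := by
  unfold Pre_solution; infer_instance

def pvWitness_solution : List Int × List Int := ([93, 30, 55], [1, 30, 5])

def Spec_solution (progresses : List Int) (speeds : List Int) (out : List Int) : Prop := out = solution_alt progresses speeds
instance (progresses : List Int) (speeds : List Int) (out : List Int) : Decidable (Spec_solution progresses speeds out) := by unfold Spec_solution; infer_instance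

-- ===== CLAIM (what is proved, stated in full; the proofs are below) =====
def Claim_equal_solution : Prop := ∀ (progresses : List Int) (speeds : List Int), Dom_solution progresses speeds → Pre_solution progresses speeds → Spec_solution progresses speeds (solution progresses speeds)

-- ===== LEMMAS AND PROOFS =====

def groupLens (m : Int) (cnt : Int) : List Int → List Int
  | [] => [cnt]
  | d :: t => if m < d then cnt :: groupLens d 1 t else groupLens m (cnt + 1) t

def newBounds (m j : Int) : List Int → List Int
  | [] => []
  | d :: t => if m < d then j :: newBounds d (j + 1) t else newBounds m (j + 1) t

def runMax (m : Int) : List Int → Int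
  | [] => m
  | d :: t => if m < d then runMax d t else runMax m t

lemma foldA (rest : List Int) : ∀ (res : List Int) (cnt m : Int),
    (rest.foldl stepA (res, cnt, m)).1 ++ [(rest.foldl stepA (res, cnt, m)).2.1]
      = res ++ groupLens m cnt rest := by
  induction rest with
  | nil => intro res cnt m; simp [groupLens]
  | cons d t ih =>
    intro res cnt m
    simp only [List.foldl_cons, stepA, groupLens]
    by_cases h : m < d
    · rw [if_pos h, if_pos h, ih]
      simp
    · rw [if_neg h, if_neg h, ih]

lemma diffs_newBounds (xs : List Int) : ∀ (m j b0 : Int),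
    List.zipWith (fun a b => b - a)
        (b0 :: (newBounds m j xs ++ [j + xs.length]))
        (newBounds m j xs ++ [j + xs.length])
      = groupLens m (j - b0) xs := by
  induction xs with
  | nil => intro m j b0; simp [newBounds, groupLens]
  | cons d t ih =>
    intro m j b0
    simp only [newBounds, groupLens, List.length_cons]
    have e : j + ((t.length + 1 : Nat) : Int) = (j + 1) + t.length := by push_cast; ring
    rw [e]
    by_cases h : m < d
    · rw [if_pos h, if_pos h]
      simp only [List.cons_append, List.zipWith_cons_cons]
      rw [ih d (j + 1) j]
      simp
    · rw [if_neg h, if_neg h]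
      have := ih m (j + 1) b0
      rw [this]
      congr 1
      omega

lemma foldB (rest : List Int) : ∀ (pre : List Int) (m : Int) (bnds : List Int),
    (PySem.List.pyRange (pre.length) ((pre.length : Int) + rest.length) 1).foldl
        (stepB (pre ++ rest)) (m, bnds)
      = (runMax m rest, bnds ++ newBounds m (pre.length) rest) := by
  induction rest with
  | nil =>
    intro pre m bnds
    rw [PySem.List.pyRange_one_eq_nil (by push_cast [List.length_nil]; omega)]
    simp [newBounds, runMax]
  | cons d t ih =>
    intro pre m bnds
    rw [PySem.List.pyRange_one_cons (by push_cast [List.length_cons]; omega)]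
    simp only [List.foldl_cons]
    have hd : stepB (pre ++ d :: t) (m, bnds) (pre.length)
        = if m < d then (d, bnds ++ [(pre.length : Int)]) else (m, bnds) := by
      simp [stepB, PySem.List.pyGetD]
    have hpre : pre ++ d :: t = (pre ++ [d]) ++ t := by simp
    have hlen : (pre.length : Int) + 1 = ((pre ++ [d]).length : Int) := by simp
    have hbound : (pre.length : Int) + (((d :: t).length : Nat) : Int)
        = ((pre ++ [d]).length : Int) + (t.length : Int) := by
      rw [List.length_append]; push_cast [List.length_cons, List.length_nil]; omega
    rw [hd, hpre, hbound]
    by_cases h : m < d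
    · rw [if_pos h, hlen, ih]
      simp [runMax, newBounds, h]
    · rw [if_neg h, hlen, ih]
      simp [runMax, newBounds, h]

lemma diffsMap (l : List Int) :
    (PySem.List.pyRange 0 ((l.length : Int) - 1) 1).map
        (fun j => PySem.List.pyGetD l (j + 1) 0 - PySem.List.pyGetD l j 0)
      = List.zipWith (fun a b => b - a) l l.tail := by
  apply List.ext_getElem
  · cases l <;> simp [PySem.List.length_pyRange_one]
  · intro k h1 h2
    have hk : (k : Int) < (l.length : Int) - 1 := by
      simp [PySem.List.length_pyRange_one] at h1
      omega
    simp only [List.getElem_map, PySem.List.getElem_pyRange_one, List.getElem_zipWith]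
    rw [show (0 : Int) + (k : Int) = (k : Int) by ring]
    have e1 : ((k : Int) + 1) = (((k + 1 : Nat)) : Int) := by push_cast; ring
    rw [e1]
    simp only [PySem.List.pyGetD_natCast]
    have hl : k + 1 < l.length := by omega
    rw [List.getD_eq_getElem _ _ hl, List.getD_eq_getElem _ _ (by omega : k < l.length),
      List.getElem_tail]

lemma whileA_eq (s : Int) (hs : 0 < s) :
    ∀ sum completion, sum < 100 →
      whileA s sum completion = completion + -(PySem.Int.floordiv (sum - 100) s) := by
  intro sum
  have H : ∀ (n : Nat) (sum : Int), (100 - sum).toNat ≤ n → ∀ completion, sum < 100 →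
      whileA s sum completion = completion + -(PySem.Int.floordiv (sum - 100) s) := by
    intro n
    induction n with
    | zero => intro sum h c hlt; omega
    | succ n ih =>
      intro sum h c hlt
      rw [whileA]
      simp only [hlt, hs, dif_pos]
      by_cases h2 : sum + s < 100
      · rw [ih (sum + s) (by omega) (c + 1) h2]
        have e1 : sum + s - 100 = (sum - 100) + 1 * s := by ring
        have e2 : PySem.Int.floordiv (sum + s - 100) s = PySem.Int.floordiv (sum - 100) s + 1 := by
          rw [PySem.Int.floordiv_eq_ediv_of_pos hs, PySem.Int.floordiv_eq_ediv_of_pos hs, e1,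
            Int.add_mul_ediv_right _ _ (by omega : s ≠ 0)]
        omega
      · rw [whileA, dif_neg h2]
        have : PySem.Int.floordiv (sum - 100) s = -1 := by
          rw [PySem.Int.floordiv_eq_iff_of_pos hs]
          constructor <;> omega
        omega
  exact fun c h => H (100 - sum).toNat sum le_rfl c h

lemma group_eq (L : List Int) (hne : L ≠ []) :
    (List.foldl (fun st i => stepA st (PySem.List.pyGetD L i 0)) ([], 1, PySem.List.pyGetD L 0 0)
          (PySem.List.pyRange 1 (L.length : Int) 1)).1 ++
        [(List.foldl (fun st i => stepA st (PySem.List.pyGetD L i 0)) ([], 1, PySem.List.pyGetD L 0 0)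
            (PySem.List.pyRange 1 (L.length : Int) 1)).2.1]
      = List.foldl
          (fun acc j => acc ++
            [PySem.List.pyGetD
                ((List.foldl (stepB L) (PySem.List.pyGetD L 0 0, [0]) (PySem.List.pyRange 1 (L.length : Int) 1)).2 ++
                  [(L.length : Int)]) (j + 1) 0 -
             PySem.List.pyGetD
                ((List.foldl (stepB L) (PySem.List.pyGetD L 0 0, [0]) (PySem.List.pyRange 1 (L.length : Int) 1)).2 ++
                  [(L.length : Int)]) j 0])
          []
          (PySem.List.pyRange 0
            ((((List.foldl (stepB L) (PySem.List.pyGetD L 0 0, [0]) (PySem.List.pyRange 1 (L.length : Int) 1)).2 ++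
                [(L.length : Int)]).length : Int) - 1) 1) := by
  obtain ⟨m0, rest, rfl⟩ := List.exists_cons_of_ne_nil hne
  have hget0 : PySem.List.pyGetD (m0 :: rest) 0 0 = m0 := by
    simp [PySem.List.pyGetD_zero]
  -- A side
  rw [hget0, PySem.List.foldl_pyRange_pyGetD' (m0 :: rest) 0 stepA ([], 1, m0) (by omega)]
  have hdrop : List.drop (1 : Int).toNat (m0 :: rest) = rest := by simp
  rw [hdrop, foldA]
  -- B side
  have hb2 : (((m0 :: rest).length : Nat) : Int) = 1 + (rest.length : Int) := by
    simp [add_comm]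
  have hfold := foldB rest [m0] m0 [0]
  simp only [List.singleton_append, List.length_singleton, Nat.cast_one] at hfold
  rw [List.nil_append, hb2, hfold]
  
  rw [PySem.List.foldl_append_singleton_eq_map
    (fun j => PySem.List.pyGetD ((0 :: newBounds m0 1 rest) ++ [(1 : Int) + (rest.length : Int)]) (j + 1) 0
      - PySem.List.pyGetD ((0 :: newBounds m0 1 rest) ++ [(1 : Int) + (rest.length : Int)]) j 0),
    List.nil_append, diffsMap]
  have hshape : ((0 :: newBounds m0 1 rest) ++ [(1 : Int) + (rest.length : Int)])
      = 0 :: (newBounds m0 1 rest ++ [(1 : Int) + (rest.length : Int)]) := by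
    simp
  rw [hshape]
  have hd := diffs_newBounds rest m0 1 0
  simp only [List.tail_cons]
  rw [hd]
  norm_num

lemma solution_eq_alt : ∀ ps ss, Pre_solution ps ss → solution ps ss = solution_alt ps ss := by
  rintro ps ss ⟨hne, hpre⟩
  unfold solution solution_alt
  simp only [PySem.List.foldl_append_singleton_eq_map
      (fun i => whileA (PySem.List.pyGetD ss i 0) (PySem.List.pyGetD ps i 0) 0),
    PySem.List.foldl_append_singleton_eq_map
      (fun i => if 100 ≤ PySem.List.pyGetD ps i 0 then 0
        else -(PySem.Int.floordiv (PySem.List.pyGetD ps i 0 - 100) (PySem.List.pyGetD ss i 0))),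
    List.nil_append]
  have hmap : (PySem.List.pyRange 0 (ps.length : Int) 1).map
      (fun i => whileA (PySem.List.pyGetD ss i 0) (PySem.List.pyGetD ps i 0) 0)
    = (PySem.List.pyRange 0 (ps.length : Int) 1).map
      (fun i => if 100 ≤ PySem.List.pyGetD ps i 0 then 0
        else -(PySem.Int.floordiv (PySem.List.pyGetD ps i 0 - 100) (PySem.List.pyGetD ss i 0))) := by
    apply List.map_congr_left
    intro i hi
    obtain ⟨h0, h1⟩ := PySem.List.mem_pyRange_one.mp hi
    by_cases hp : 100 ≤ PySem.List.pyGetD ps i 0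
    · rw [if_pos hp, whileA, dif_neg (by omega)]
    · rw [if_neg hp]
      have hgp : PySem.List.pyGetD ps i 0 = ps.getD i.toNat 0 := by
        rw [PySem.List.pyGetD_eq_getElem ps 0 h0 h1, List.getD_eq_getElem _ _ (by omega)]
      have hk := hpre i.toNat (by omega)
      rcases hk with hk | ⟨hks, hkv⟩
      · omega
      · have hgs : PySem.List.pyGetD ss i 0 = ss.getD i.toNat 0 := by
          rw [PySem.List.pyGetD_eq_getElem ss 0 h0 (by omega), List.getD_eq_getElem _ _ (by omega)]
        rw [hgs, hgp]
        rw [whileA_eq _ (by omega) _ 0 (by omega)]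
        omega
  rw [hmap]
  set L := (PySem.List.pyRange 0 (ps.length : Int) 1).map
      (fun i => if 100 ≤ PySem.List.pyGetD ps i 0 then 0
        else -(PySem.Int.floordiv (PySem.List.pyGetD ps i 0 - 100) (PySem.List.pyGetD ss i 0))) with hL
  have hLne : L ≠ [] := by
    intro h
    have : L.length = 0 := by rw [h]; rfl
    rw [hL] at this
    simp [PySem.List.length_pyRange_one] at this
    exact hne this
  clear hL hmap hpre hne
  exact group_eq L hLne

-- ===== VERDICT (by name: the statement is the Claim_ definition above) =====
theorem solution_spec : Claim_equal_solution := by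
  intro progresses speeds _ hpre
  exact solution_eq_alt progresses speeds hpre
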